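-- pv_equiv track=rewrite | github.com/fairtracks/omnipy | src/omnipy/data/_display/panel/flow.py | _distribute_width_to_cramped_panels
-- ===== SOURCE A (Python) =====
-- from collections import defaultdict
-- from typing import cast, Generic, NamedTuple
--
-- class CrampedPanelInfo(NamedTuple):
--     key: str
--     panel_width: int
--
-- def _distribute_width_to_cramped_panels(
--     title_width2cramped_panels: defaultdict[int, list[CrampedPanelInfo]],
--     extra_width: int,
-- ) -> defaultdict[str, int]:
--     """
--     Distribute extra width to cramped panels, prioritizing shortest titles
--     first.
--
--     Uses a round-robin approach to add 1 unit of width at a time to panels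
--     with the shortest titles first until either all panels fit their titles
--     or the extra width is exhausted.
--
--     Parameters:
--         title_width2cramped_panels: Dict mapping title widths to panels
--         extra_width: Total extra width available to distribute
--
--     Returns:
--         Dict mapping panel keys to width additions
--     """
--     panel_width_additions: defaultdict[str, int] = defaultdict(int)
--     title_widths = list(sorted(title_width2cramped_panels.keys()))
--
--     while extra_width > 0 and title_widths:
--         title_width = title_widths[0]
--         key, panel_width = title_width2cramped_panels[title_width].pop(0)
--
--         # Add 1 to this panel's width
--         panel_width_additions[key] += 1
--         extra_width -= 1
--
--         # If panel still needs width, put it back in the queue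
--         if panel_width + 1 < title_width:
--             title_width2cramped_panels[title_width].append(CrampedPanelInfo(key, panel_width + 1))
--
--         elif not title_width2cramped_panels[title_width]:
--             # Remove empty title width entries
--             del title_width2cramped_panels[title_width]
--             title_widths.pop(0)
--
--     return panel_width_additions
-- ===== SOURCE B (Python) =====
-- from collections import defaultdict
--
--
-- def _full_rounds(needs, budget):
--     # largest r with sum(min(n, r) for n in needs) <= budget,
--     # given 0 < budget < sum(needs); binary search on the water level r
--     lo, hi = 0, max(needs)
--     while hi - lo > 1:
--         mid = (lo + hi) // 2
--         if sum(min(n, mid) for n in needs) <= budget: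
--             lo = mid
--         else:
--             hi = mid
--     return lo
--
--
-- def _distribute_width_to_cramped_panels(
--     title_width2cramped_panels,
--     extra_width,
-- ):
--     additions = defaultdict(int)
--     budget = extra_width
--     for title_width in sorted(title_width2cramped_panels):
--         if budget <= 0:
--             break
--         panels = title_width2cramped_panels[title_width]
--         needs = [max(title_width - panel_width, 1) for _, panel_width in panels]
--         total = sum(needs)
--         if budget >= total:
--             # every panel in this group can be fully satisfied
--             for (key, _), need in zip(panels, needs):
--                 additions[key] += need
--             budget -= total
--         else:
--             # water-filling: r complete round-robin rounds fit in the budget,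
--             # the remainder goes to the first panels still needing width
--             r = _full_rounds(needs, budget)
--             rem = budget - sum(min(n, r) for n in needs)
--             for (key, _), need in zip(panels, needs):
--                 amount = min(need, r)
--                 if need > r and rem > 0:
--                     amount += 1
--                     rem -= 1
--                 if amount > 0:
--                     additions[key] += amount
--             break
--     return additions
-- ===== Notes on version B (the rewrite author's own statement) =====
-- stated objective: faster
-- what changed: Replaces the unit-by-unit round-robin queue simulation (one dict pop/append per width unit) with per-group water-filling: each title-width group is either fully funded in one pass or the water level r (number of complete round-robin rounds) is found by binary search and the remainder goes to the first panels still short, so the work no longer grows with extra_width.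
-- outside the precondition, e.g. on _distribute_width_to_cramped_panels({2: [('a', 0)], 5: []}, 1): A returns {'a': 1}, B returns {'a': 1}
import Mathlib
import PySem

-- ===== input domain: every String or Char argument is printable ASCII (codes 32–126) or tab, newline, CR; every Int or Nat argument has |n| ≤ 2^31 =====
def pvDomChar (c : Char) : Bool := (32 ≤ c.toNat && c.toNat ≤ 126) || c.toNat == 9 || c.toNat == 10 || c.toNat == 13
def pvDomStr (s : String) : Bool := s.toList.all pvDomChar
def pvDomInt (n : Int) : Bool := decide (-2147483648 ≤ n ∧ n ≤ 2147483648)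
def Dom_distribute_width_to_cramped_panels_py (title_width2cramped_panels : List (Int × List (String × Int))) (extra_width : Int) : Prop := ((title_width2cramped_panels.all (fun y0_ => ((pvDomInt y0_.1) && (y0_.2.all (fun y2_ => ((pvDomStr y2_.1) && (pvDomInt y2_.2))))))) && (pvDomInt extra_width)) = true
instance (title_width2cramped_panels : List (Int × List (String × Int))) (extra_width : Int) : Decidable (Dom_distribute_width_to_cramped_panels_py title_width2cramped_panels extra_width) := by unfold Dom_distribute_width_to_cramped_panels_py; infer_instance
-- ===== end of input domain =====

-- B replaces A's unit-by-unit round-robin with per-group water-filling (full funding in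
-- one pass, else binary-searched water level + remainder to the first still-short panels);
-- A mutates its input dict in place (pop/append/del) while B only reads it, so the
-- equivalence proved here is about the RETURN value only.

-- ===== PORT A =====
-- while extra_width > 0 and title_widths: pop the front panel of the smallest title
-- width, give it one unit, re-queue it if still short, drop emptied groups.
def pyDistLoop (d : PySem.Dict Int (List (String × Int))) (tws : List Int)
    (adds : PySem.Dict String Int) (extra : Int) : PySem.Dict String Int :=
  if 0 < extra then
    match tws with
    | [] => adds
    | tw :: rest =>
      match PySem.List.pop? (d.getD tw []) 0 with
      | none => adds   -- Python raises IndexError here (pop from empty list); Pre_ excludes this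
      | some ((key, pw), l') =>
        let d1 := d.insert tw l'
        let adds1 := adds.modify key 0 (· + 1)
        if pw + 1 < tw then
          pyDistLoop (d1.insert tw ((d1.getD tw []) ++ [(key, pw + 1)])) (tw :: rest) adds1 (extra - 1)
        else if (d1.getD tw []).isEmpty then
          pyDistLoop (d1.erase tw) rest adds1 (extra - 1)
        else
          pyDistLoop d1 (tw :: rest) adds1 (extra - 1)
  else adds
termination_by extra.toNat
decreasing_by all_goals omega

def distribute_width_to_cramped_panels_py (title_width2cramped_panels : List (Int × List (String × Int))) (extra_width : Int) : List (String × Int) :=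
  let d := PySem.Dict.ofList title_width2cramped_panels
  let title_widths := PySem.List.sorted d.keys (fun x => x) false
  (pyDistLoop d title_widths PySem.Dict.empty extra_width).items

-- ===== PORT B =====
-- binary search for the largest water level r with sum(min(n, r)) <= budget
def pyAltRounds (needs : List Int) (budget lo hi : Int) : Int :=
  if 1 < hi - lo then
    let mid := PySem.Int.floordiv (lo + hi) 2
    if (needs.map (fun n => min n mid)).sum ≤ budget then pyAltRounds needs budget mid hi
    else pyAltRounds needs budget lo mid
  else lo
termination_by (hi - lo).toNat
decreasing_by
  all_goals
    have h1 := (PySem.Int.le_floordiv_iff_mul_le (a := lo + hi) (b := 2) (q := lo + 1) (by omega)).mpr (by omega)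
    have h2 := (PySem.Int.floordiv_lt_iff_lt_mul (a := lo + hi) (b := 2) (q := hi) (by omega)).mpr (by omega)
    omega

def pyAltMain (tws : List Int) (d0 : PySem.Dict Int (List (String × Int)))
    (adds : PySem.Dict String Int) (budget : Int) : PySem.Dict String Int :=
  match tws with
  | [] => adds
  | tw :: rest =>
    if budget ≤ 0 then adds
    else
      let panels := d0.getD tw []
      let needs := panels.map (fun p => max (tw - p.2) 1)
      let total := needs.sum
      if total ≤ budget then
        -- every panel of this group fully funded in one pass
        pyAltMain rest d0
          ((panels.zip needs).foldl (fun a pn => a.modify pn.1.1 0 (· + pn.2)) adds)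
          (budget - total)
      else
        match PySem.List.max? needs (fun x => x) with
        | none => adds   -- unreachable: needs = [] forces total = 0 ≤ budget
        | some mx =>
          let r := pyAltRounds needs budget 0 mx
          let rem := budget - (needs.map (fun n => min n r)).sum
          ((panels.zip needs).foldl
            (fun (st : PySem.Dict String Int × Int) pn =>
              let ex : Int := if r < pn.2 ∧ 0 < st.2 then 1 else 0
              let amount := min pn.2 r + ex
              (if 0 < amount then st.1.modify pn.1.1 0 (· + amount) else st.1, st.2 - ex))
            (adds, rem)).1

def distribute_width_to_cramped_panels_py_alt (title_width2cramped_panels : List (Int × List (String × Int))) (extra_width : Int) : List (String × Int) :=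
  let d0 := PySem.Dict.ofList title_width2cramped_panels
  (pyAltMain (PySem.List.sorted d0.keys (fun x => x) false) d0 PySem.Dict.empty extra_width).items

-- ===== PRECONDITION & SPEC =====
-- Pre_ excludes inputs that carry an empty panel list while extra_width > 0: on those A
-- raises IndexError as soon as the round-robin reaches the empty group (whether it is
-- reached depends on the budget; B returns normally there).
def Pre_distribute_width_to_cramped_panels_py (title_width2cramped_panels : List (Int × List (String × Int))) (extra_width : Int) : Prop :=
  extra_width ≤ 0 ∨ ∀ p ∈ title_width2cramped_panels, p.2 ≠ []
instance (title_width2cramped_panels : List (Int × List (String × Int))) (extra_width : Int) : Decidable (Pre_distribute_width_to_cramped_panels_py title_width2cramped_panels extra_width) := by unfold Pre_distribute_width_to_cramped_panels_py; infer_instance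

def pvWitness_distribute_width_to_cramped_panels_py : (List (Int × List (String × Int))) × Int :=
  ([(3, [("a", 1), ("b", 0)]), (5, [("c", 0)])], 7)

def Spec_distribute_width_to_cramped_panels_py (title_width2cramped_panels : List (Int × List (String × Int))) (extra_width : Int) (out : List (String × Int)) : Prop := out = distribute_width_to_cramped_panels_py_alt title_width2cramped_panels extra_width
instance (title_width2cramped_panels : List (Int × List (String × Int))) (extra_width : Int) (out : List (String × Int)) : Decidable (Spec_distribute_width_to_cramped_panels_py title_width2cramped_panels extra_width out) := by unfold Spec_distribute_width_to_cramped_panels_py; infer_instance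

-- ===== CLAIM (what is proved, stated in full; the proofs are below) =====
def Claim_equal_distribute_width_to_cramped_panels_py : Prop := ∀ (title_width2cramped_panels : List (Int × List (String × Int))) (extra_width : Int), Dom_distribute_width_to_cramped_panels_py title_width2cramped_panels extra_width → Pre_distribute_width_to_cramped_panels_py title_width2cramped_panels extra_width → Spec_distribute_width_to_cramped_panels_py title_width2cramped_panels extra_width (distribute_width_to_cramped_panels_py title_width2cramped_panels extra_width)

-- ===== LEMMAS AND PROOFS =====

-- ---- abstract objects used only by the proofs ----

def pvNeed (tw w : Int) : Int := max (tw - w) 1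
def pvNds (tw : Int) (q : List (String × Int)) : List Int := q.map (fun p => pvNeed tw p.2)
def pvS (tw : Int) (q : List (String × Int)) (r : Int) : Int := ((pvNds tw q).map (fun n => min n r)).sum
def pvT (tw : Int) (q : List (String × Int)) : Int := (pvNds tw q).sum
def pvStep (tw : Int) (q : List (String × Int)) : List (String × Int) :=
  (q.filter (fun p => p.2 + 1 < tw)).map (fun p => (p.1, p.2 + 1))

def pvTouch (tw : Int) (q : List (String × Int)) (extra : Int) : List String :=
  if 0 < extra then
    match q with
    | [] => []
    | (k, w) :: q' =>
      k :: (if w + 1 < tw then pvTouch tw (q' ++ [(k, w + 1)]) (extra - 1) else pvTouch tw q' (extra - 1))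
  else []
termination_by extra.toNat
decreasing_by all_goals omega

def pvFoldMod (l : List (String × Int)) (d : PySem.Dict String Int) : PySem.Dict String Int :=
  l.foldl (fun d p => d.modify p.1 0 (· + p.2)) d

def pvVsum (v : String) (l : List (String × Int)) : Int :=
  ((l.filter (fun p => p.1 == v)).map (·.2)).sum

def pvAList (tw : Int) (q : List (String × Int)) (r rem : Int) : List (String × Int) :=
  match q with
  | [] => []
  | (k, w) :: q' =>
    let n := pvNeed tw w
    let ex : Int := if r < n ∧ 0 < rem then 1 else 0
    let a := min n r + ex
    (if 0 < a then [(k, a)] else []) ++ pvAList tw q' r (rem - ex)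

def pvAFull (tw : Int) (q : List (String × Int)) : List (String × Int) :=
  q.map (fun p => (p.1, pvNeed tw p.2))

def pvGTouch : List (Int × List (String × Int)) → Int → List String
  | [], _ => []
  | (tw, q) :: t, e =>
    if e ≤ 0 then [] else
      pvTouch tw q e ++ pvGTouch t (e - (pvTouch tw q e).length)

def pvBAll : List (Int × List (String × Int)) → Int → List (String × Int)
  | [], _ => []
  | (tw, q) :: t, e =>
    if e ≤ 0 then [] else
      if pvT tw q ≤ e then pvAFull tw q ++ pvBAll t (e - pvT tw q)
      else
        match PySem.List.max? (pvNds tw q) (fun x => x) with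
        | none => []
        | some mx => pvAList tw q (pyAltRounds (pvNds tw q) e 0 mx) (e - pvS tw q (pyAltRounds (pvNds tw q) e 0 mx))

-- ---- small algebraic facts ----

theorem pvVsum_nil (v : String) : pvVsum v [] = 0 := by simp [pvVsum]
theorem pvVsum_cons (v : String) (k : String) (a : Int) (t : List (String × Int)) :
    pvVsum v ((k, a) :: t) = (if k = v then a else 0) + pvVsum v t := by
  by_cases h : k = v <;> simp [pvVsum, List.filter_cons, h]
theorem pvVsum_append (v : String) (l1 l2 : List (String × Int)) :
    pvVsum v (l1 ++ l2) = pvVsum v l1 + pvVsum v l2 := by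
  simp [pvVsum, List.filter_append]
theorem pvVsum_ones (v : String) (l : List String) :
    pvVsum v (l.map (fun k => (k, (1 : Int)))) = (l.count v : Int) := by
  induction l with
  | nil => simp [pvVsum]
  | cons k t ih =>
    rw [List.map_cons, pvVsum_cons, ih, List.count_cons]
    by_cases h : k = v <;> simp [h] <;> omega

theorem pvNeed_pos (tw w : Int) : 1 ≤ pvNeed tw w := by simp [pvNeed]
theorem pvS_cons (tw : Int) (p : String × Int) (q : List (String × Int)) (r : Int) :
    pvS tw (p :: q) r = min (pvNeed tw p.2) r + pvS tw q r := by simp [pvS, pvNds]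
theorem pvT_cons (tw : Int) (p : String × Int) (q : List (String × Int)) :
    pvT tw (p :: q) = pvNeed tw p.2 + pvT tw q := by simp [pvT, pvNds]
theorem pvNeed_two_iff (tw w : Int) : w + 1 < tw ↔ 2 ≤ pvNeed tw w := by simp [pvNeed]; omega
theorem pvNeed_succ (tw w : Int) (h : w + 1 < tw) : pvNeed tw (w + 1) = pvNeed tw w - 1 := by
  simp [pvNeed]; omega
theorem pvStep_cons_keep (tw : Int) (p : String × Int) (q : List (String × Int)) (h : p.2 + 1 < tw) :
    pvStep tw (p :: q) = (p.1, p.2 + 1) :: pvStep tw q := by simp [pvStep, List.filter_cons, h]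
theorem pvStep_cons_drop (tw : Int) (p : String × Int) (q : List (String × Int)) (h : ¬ p.2 + 1 < tw) :
    pvStep tw (p :: q) = pvStep tw q := by simp [pvStep, List.filter_cons, h]
theorem pvStep_nil (tw : Int) : pvStep tw [] = [] := by simp [pvStep]

theorem pvS_zero (tw : Int) (q : List (String × Int)) : pvS tw q 0 = 0 := by
  induction q with
  | nil => simp [pvS, pvNds]
  | cons p q ih => have := pvNeed_pos tw p.2; rw [pvS_cons, ih]; omega
theorem pvS_one (tw : Int) (q : List (String × Int)) : pvS tw q 1 = (q.length : Int) := by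
  induction q with
  | nil => simp [pvS, pvNds]
  | cons p q ih => have := pvNeed_pos tw p.2; rw [pvS_cons, ih]; simp; omega
theorem pvS_nonneg (tw : Int) (q : List (String × Int)) (r : Int) (hr : 0 ≤ r) : 0 ≤ pvS tw q r := by
  induction q with
  | nil => simp [pvS, pvNds]
  | cons p q ih => have := pvNeed_pos tw p.2; rw [pvS_cons]; omega
theorem pvS_mono (tw : Int) (q : List (String × Int)) (r r' : Int) (h0 : 0 ≤ r) (h : r ≤ r') :
    pvS tw q r ≤ pvS tw q r' := by
  induction q with
  | nil => simp [pvS, pvNds]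
  | cons p q ih => rw [pvS_cons, pvS_cons]; omega
theorem pvS_succ_step (tw : Int) (q : List (String × Int)) (r : Int) (hr : 0 ≤ r) :
    pvS tw q (r + 1) = (q.length : Int) + pvS tw (pvStep tw q) r := by
  induction q with
  | nil => simp [pvS, pvNds, pvStep_nil]
  | cons p q ih =>
    have h1 := pvNeed_pos tw p.2
    by_cases hc : p.2 + 1 < tw
    · have h2 := (pvNeed_two_iff tw p.2).mp hc
      rw [pvS_cons, pvStep_cons_keep tw p q hc, pvS_cons, pvNeed_succ tw p.2 hc]
      simp only [List.length_cons]
      push_cast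
      omega
    · have h2 : pvNeed tw p.2 = 1 := by simp [pvNeed]; omega
      rw [pvS_cons, pvStep_cons_drop tw p q hc, h2]
      simp only [List.length_cons]
      push_cast
      omega
theorem pvT_step (tw : Int) (q : List (String × Int)) :
    pvT tw (pvStep tw q) = pvT tw q - (q.length : Int) := by
  induction q with
  | nil => simp [pvT, pvNds, pvStep_nil]
  | cons p q ih =>
    by_cases hc : p.2 + 1 < tw
    · have h2 := (pvNeed_two_iff tw p.2).mp hc
      rw [pvStep_cons_keep tw p q hc, pvT_cons, pvT_cons, pvNeed_succ tw p.2 hc]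
      simp only [List.length_cons]; push_cast; omega
    · have h2 : pvNeed tw p.2 = 1 := by simp [pvNeed]; omega
      rw [pvStep_cons_drop tw p q hc, pvT_cons, h2]
      simp only [List.length_cons]; push_cast; omega
theorem pvT_eq_S (tw : Int) (q : List (String × Int)) (r : Int)
    (h : ∀ n ∈ pvNds tw q, n ≤ r) : pvS tw q r = pvT tw q := by
  induction q with
  | nil => simp [pvS, pvT, pvNds]
  | cons p q ih =>
    have h1 : pvNeed tw p.2 ≤ r := h _ (by simp [pvNds])
    have h2 : ∀ n ∈ pvNds tw q, n ≤ r := fun n hn => h n (by simp [pvNds] at hn ⊢; exact Or.inr hn)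
    rw [pvS_cons, pvT_cons, ih h2]; omega
theorem pvLen_le_T (tw : Int) (q : List (String × Int)) : (q.length : Int) ≤ pvT tw q := by
  induction q with
  | nil => simp [pvT, pvNds]
  | cons p q ih =>
    have := pvNeed_pos tw p.2
    rw [pvT_cons]; simp only [List.length_cons]; push_cast; omega

-- ---- dedup / Set.update helpers ----

theorem pvUpdate_filter : ∀ (l : List String) (s : PySem.Set String) (p : String → Bool),
    (∀ y, p y = false → y ∈ s) → PySem.Set.update s (l.filter p) = PySem.Set.update s l := by
  intro l
  induction l with
  | nil => intro s p h; rfl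
  | cons y t ih =>
    intro s p h
    cases hpy : p y with
    | true =>
      simp only [List.filter_cons, hpy, if_true, PySem.Set.update, List.foldl_cons]
      exact ih (PySem.Set.add s y) p (fun z hz => (PySem.Set.mem_add _ _ _).mpr (Or.inl (h z hz)))
    | false =>
      have hy : y ∈ s := h y hpy
      simp only [List.filter_cons, hpy, Bool.false_eq_true, if_false, PySem.Set.update, List.foldl_cons,
        PySem.Set.add_of_mem hy]
      exact ih s p h

theorem pvUpdate_subset : ∀ (l : List String) (s : PySem.Set String),
    (∀ x ∈ l, x ∈ s) → PySem.Set.update s l = s := by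
  intro l
  induction l with
  | nil => intro s _; rfl
  | cons y t ih =>
    intro s h
    simp only [PySem.Set.update, List.foldl_cons, PySem.Set.add_of_mem (h y (by simp))]
    exact ih s (fun x hx => h x (by simp [hx]))

theorem pvUpdate_dedup : ∀ (l : List String) (s : PySem.Set String),
    PySem.Set.update s l = PySem.Set.update s (PySem.Set.ofList l) := by
  intro l
  induction l with
  | nil => intro s; rw [PySem.Set.ofList_nil]
  | cons x t ih =>
    intro s
    rw [PySem.Set.ofList_cons]
    have h1 : PySem.Set.update s (x :: (PySem.Set.ofList t).discard x)
        = PySem.Set.update (PySem.Set.add s x) ((PySem.Set.ofList t).discard x) := rfl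
    have h2 : PySem.Set.update s (x :: t) = PySem.Set.update (PySem.Set.add s x) t := rfl
    rw [h1, h2, PySem.Set.discard]
    rw [pvUpdate_filter (PySem.Set.ofList t) (PySem.Set.add s x) (fun y => !(y == x))
      (fun y hy => by
        have : y = x := by simpa using hy
        exact (PySem.Set.mem_add _ _ _).mpr (Or.inr this))]
    exact ih (PySem.Set.add s x)

theorem pvDedup_append (a b : List String) :
    PySem.List.dedup (a ++ b) = PySem.Set.update (PySem.List.dedup a) (PySem.List.dedup b) := by
  rw [PySem.List.dedup_eq_ofList, PySem.List.dedup_eq_ofList, PySem.List.dedup_eq_ofList,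
    PySem.Set.ofList_append, pvUpdate_dedup]

theorem pvDedup_append_subset (a b : List String) (h : ∀ x ∈ b, x ∈ a) :
    PySem.List.dedup (a ++ b) = PySem.List.dedup a := by
  rw [pvDedup_append]
  exact pvUpdate_subset _ _ (fun x hx => by
    rw [PySem.List.dedup_eq_ofList] at hx ⊢
    exact (PySem.Set.mem_ofList a x).mpr (h x ((PySem.Set.mem_ofList b x).mp hx)))

theorem pvDedup_congr_append (a a' b b' : List String)
    (ha : PySem.List.dedup a = PySem.List.dedup a') (hb : PySem.List.dedup b = PySem.List.dedup b') :
    PySem.List.dedup (a ++ b) = PySem.List.dedup (a' ++ b') := by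
  rw [pvDedup_append, ha, hb, ← pvDedup_append]

-- ---- the dict engine: a fold of modify(+value) characterised by its items ----

theorem pvDedup_cons (k : String) (t : List String) :
    PySem.List.dedup (k :: t) = k :: (PySem.List.dedup t).filter (fun y => !(y == k)) := by
  rw [PySem.List.dedup_eq_ofList, PySem.List.dedup_eq_ofList, PySem.Set.ofList_cons,
    PySem.Set.discard]

theorem pvFoldMod_items : ∀ (l : List (String × Int)) (d : PySem.Dict String Int), d.keys.Nodup →
    (pvFoldMod l d).items =
      d.items.map (fun q => (q.1, q.2 + pvVsum q.1 l)) ++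
      ((PySem.List.dedup (l.map (·.1))).filter (fun k => !(d.contains k))).map (fun k => (k, pvVsum k l)) := by
  intro l
  induction l with
  | nil =>
    intro d _
    simp [pvFoldMod, pvVsum_nil, PySem.List.dedup_eq_ofList, PySem.Set.ofList_nil]
  | cons p t ih =>
    obtain ⟨k, a⟩ := p
    intro d hnd
    have hstep : pvFoldMod ((k, a) :: t) d = pvFoldMod t (d.modify k 0 (· + a)) := rfl
    have hmod : d.modify k 0 (· + a) = d.insert k (d.getD k 0 + a) := rfl
    have hnd1 : (d.modify k 0 (· + a)).keys.Nodup := by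
      rw [hmod]; exact PySem.Dict.nodup_keys_insert d k _ hnd
    have hcont : ∀ y, (d.modify k 0 (· + a)).contains y = (y == k || d.contains y) := by
      intro y; rw [hmod]; exact PySem.Dict.contains_insert d k y _
    rw [hstep, ih _ hnd1]
    rw [List.map_cons, pvDedup_cons]
    by_cases hc : d.contains k = true
    · -- k already present: the insert rewrites the stored pair in place
      have hitems : (d.modify k 0 (· + a)).items
          = d.items.map (fun p => if p.1 == k then (k, d.getD k 0 + a) else p) := by
        rw [hmod]; exact PySem.Dict.items_insert_of_contains d _ hc
      congr 1
      · -- existing items accumulate the head value at key k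
        rw [hitems, List.map_map]
        apply List.map_congr_left
        intro p hp
        by_cases hpk : p.1 = k
        · have hval : d.getD k 0 = p.2 := by
            refine PySem.Dict.getD_of_mem_items d ?_ hnd 0
            rw [← hpk]; exact hp
          have hbeq : (p.1 == k) = true := by simpa using hpk
          simp [hbeq, hval, hpk, pvVsum_cons, Prod.ext_iff]
          ring
        · have hbeq : (p.1 == k) = false := by simpa using hpk
          simp only [Function.comp_apply, hbeq, Bool.false_eq_true, if_false, pvVsum_cons,
            if_neg (Ne.symm hpk), Prod.ext_iff]
          exact ⟨trivial, by ring⟩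
      · -- the new-keys tail: k is filtered out on both sides
        have hk : (!(d.contains k)) = false := by simp [hc]
        rw [List.filter_cons, hk]
        simp only [Bool.false_eq_true, if_false]
        rw [List.filter_filter]
        have hfilter : List.filter (fun y => !(d.modify k 0 (· + a)).contains y)
              (PySem.List.dedup (t.map (·.1)))
            = List.filter (fun y => !d.contains y && !(y == k)) (PySem.List.dedup (t.map (·.1))) := by
          apply List.filter_congr
          intro y _
          show (!(d.modify k 0 (· + a)).contains y) = _
          rw [hcont y]
          cases h1 : y == k <;> cases h2 : d.contains y <;> simp [h1, h2]
        rw [hfilter]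
        apply List.map_congr_left
        intro y hy
        have hyk : y ≠ k := by
          have := List.of_mem_filter hy
          simp at this
          exact this.2
        rw [pvVsum_cons, if_neg (Ne.symm hyk)]
        simp
    · -- k is new: the insert appends (k, a) and k survives as head of the dedup
      have hc' : d.contains k = false := by simpa using hc
      have hitems : (d.modify k 0 (· + a)).items = d.items ++ [(k, d.getD k 0 + a)] := by
        rw [hmod]; exact PySem.Dict.items_insert_of_not_contains d _ hc'
      have hget : d.getD k 0 = 0 := PySem.Dict.getD_of_not_contains d 0 hc'
      have hknotmem : k ∉ d.keys := by
        intro hmem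
        rw [← PySem.Dict.contains_iff_mem_keys] at hmem
        rw [hc'] at hmem; exact Bool.false_ne_true hmem
      rw [hitems, List.map_append]
      have hk : (!(d.contains k)) = true := by simp [hc']
      rw [List.filter_cons, hk]
      simp only [if_true]
      have hmid : List.map (fun q => (q.1, q.2 + pvVsum q.1 t)) [(k, d.getD k 0 + a)]
          = [(k, pvVsum k ((k, a) :: t))] := by
        simp [pvVsum_cons, hget]
      rw [hmid, List.map_cons, List.append_assoc, List.singleton_append]
      congr 1
      · -- old items: none has key k
        apply List.map_congr_left
        intro p hp
        have hpk : p.1 ≠ k := by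
          intro h
          exact hknotmem (h ▸ PySem.Dict.mem_keys_of_mem_items d hp)
        rw [pvVsum_cons, if_neg (Ne.symm hpk)]
        simp
      · congr 1
        rw [List.filter_filter]
        have hfilter : List.filter (fun y => !(d.modify k 0 (· + a)).contains y)
              (PySem.List.dedup (t.map (·.1)))
            = List.filter (fun y => !(d.contains y) && !(y == k)) (PySem.List.dedup (t.map (·.1))) := by
          apply List.filter_congr
          intro y _
          show (!(d.modify k 0 (· + a)).contains y) = _
          rw [hcont y]
          cases h1 : y == k <;> cases h2 : d.contains y <;> simp [h1, h2]
        rw [hfilter]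
        apply List.map_congr_left
        intro y hy
        have hyk : y ≠ k := by
          have := List.of_mem_filter hy
          simp at this
          exact this.2
        rw [pvVsum_cons, if_neg (Ne.symm hyk)]
        simp

theorem pvFoldMod_empty_items (l : List (String × Int)) :
    (pvFoldMod l PySem.Dict.empty).items =
      (PySem.List.dedup (l.map (·.1))).map (fun k => (k, pvVsum k l)) := by
  rw [pvFoldMod_items l PySem.Dict.empty PySem.Dict.nodup_keys_empty]
  simp [PySem.Dict.contains_empty, PySem.Dict.empty]

-- ---- touch-list structure (round decomposition) ----

theorem pvTouch_nil (tw e : Int) : pvTouch tw [] e = [] := by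
  rw [pvTouch.eq_def]; split <;> rfl
theorem pvTouch_nonpos (tw : Int) (q : List (String × Int)) (e : Int) (he : e ≤ 0) :
    pvTouch tw q e = [] := by
  rw [pvTouch.eq_def, if_neg (by omega)]
theorem pvTouch_cons (tw : Int) (k : String) (w : Int) (q' : List (String × Int)) (e : Int) (he : 0 < e) :
    pvTouch tw ((k, w) :: q') e
      = k :: (if w + 1 < tw then pvTouch tw (q' ++ [(k, w + 1)]) (e - 1) else pvTouch tw q' (e - 1)) := by
  rw [pvTouch.eq_def, if_pos he]

theorem pvTouch_subset_aux (tw : Int) : ∀ (n : Nat) (q : List (String × Int)) (e : Int),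
    e.toNat ≤ n → ∀ k ∈ pvTouch tw q e, k ∈ q.map (·.1) := by
  intro n
  induction n with
  | zero =>
    intro q e he k hk
    rw [pvTouch_nonpos tw q e (by omega)] at hk
    simp at hk
  | succ n ih =>
    intro q e he k hk
    by_cases hp : 0 < e
    · cases q with
      | nil => rw [pvTouch_nil] at hk; simp at hk
      | cons p q' =>
        obtain ⟨k0, w⟩ := p
        rw [pvTouch_cons _ _ _ _ _ hp] at hk
        rcases List.mem_cons.mp hk with hk | hk
        · simp [hk]
        · split at hk
          · have := ih _ _ (by omega) k hk
            simp at this ⊢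
            tauto
          · have := ih _ _ (by omega) k hk
            simp at this ⊢
            tauto
    · rw [pvTouch_nonpos tw q e (by omega)] at hk
      simp at hk

theorem pvTouch_subset (tw : Int) (q : List (String × Int)) (e : Int) :
    ∀ k ∈ pvTouch tw q e, k ∈ q.map (·.1) :=
  pvTouch_subset_aux tw e.toNat q e (Nat.le_refl _)

theorem pvStep_subset (tw : Int) (q : List (String × Int)) :
    ∀ k ∈ (pvStep tw q).map (·.1), k ∈ q.map (·.1) := by
  intro y hy
  simp only [pvStep, List.mem_map] at hy
  obtain ⟨p, hpe, hfst⟩ := hy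
  obtain ⟨a2, ha2, hga⟩ := hpe
  exact List.mem_map.mpr ⟨a2, (List.mem_filter.mp ha2).1, by subst hga; simpa using hfst⟩

theorem pvTouch_round (tw : Int) (front back : List (String × Int)) (e : Int)
    (h : (front.length : Int) ≤ e) :
    pvTouch tw (front ++ back) e =
      front.map (·.1) ++ pvTouch tw (back ++ pvStep tw front) (e - front.length) := by
  induction front generalizing back e with
  | nil => simp [pvStep_nil]
  | cons p f' ih =>
    obtain ⟨k, w⟩ := p
    simp only [List.length_cons] at h
    have he : 0 < e := by push_cast at h; omega
    rw [List.cons_append, pvTouch_cons _ _ _ _ _ he]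
    by_cases hc : w + 1 < tw
    · rw [if_pos hc, List.append_assoc]
      rw [ih (back ++ [(k, w + 1)]) (e - 1) (by push_cast at h ⊢; omega)]
      rw [pvStep_cons_keep tw (k, w) f' hc]
      simp only [List.map_cons, List.cons_append, List.append_assoc, List.singleton_append,
        List.nil_append, List.length_cons]
      push_cast
      rw [show e - ((f'.length : Int) + 1) = e - 1 - (f'.length : Int) from by omega]
    · rw [if_neg hc]
      rw [ih back (e - 1) (by push_cast at h ⊢; omega)]
      rw [pvStep_cons_drop tw (k, w) f' hc]
      simp only [List.map_cons, List.cons_append, List.length_cons]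
      push_cast
      rw [show e - ((f'.length : Int) + 1) = e - 1 - (f'.length : Int) from by omega]

theorem pvTouch_partial_aux (tw : Int) : ∀ (n : Nat) (q : List (String × Int)) (e : Int),
    e.toNat ≤ n → 0 ≤ e → e < (q.length : Int) →
    pvTouch tw q e = (q.take e.toNat).map (·.1) := by
  intro n
  induction n with
  | zero =>
    intro q e hn h0 h
    have : e = 0 := by omega
    subst this
    rw [pvTouch_nonpos tw q 0 (by omega)]
    simp
  | succ n ih =>
    intro q e hn h0 h
    by_cases hp : 0 < e
    · cases q with
      | nil => simp at h; omega
      | cons p q' =>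
        obtain ⟨k, w⟩ := p
        simp only [List.length_cons] at h
        push_cast at h
        rw [pvTouch_cons _ _ _ _ _ hp]
        have h3 : e.toNat = (e - 1).toNat + 1 := by omega
        by_cases hc : w + 1 < tw
        · rw [if_pos hc]
          rw [ih (q' ++ [(k, w + 1)]) (e - 1) (by omega) (by omega) (by simp; omega)]
          have h2 : (e - 1).toNat ≤ q'.length := by omega
          rw [List.take_append_of_le_length h2]
          rw [h3, List.take_succ_cons, List.map_cons]
        · rw [if_neg hc]
          rw [ih q' (e - 1) (by omega) (by omega) (by omega)]
          rw [h3, List.take_succ_cons, List.map_cons]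
    · have : e = 0 := by omega
      subst this
      rw [pvTouch_nonpos tw q 0 (by omega)]
      simp

theorem pvTouch_partial (tw : Int) (q : List (String × Int)) (e : Int)
    (h0 : 0 ≤ e) (h : e < (q.length : Int)) :
    pvTouch tw q e = (q.take e.toNat).map (·.1) :=
  pvTouch_partial_aux tw e.toNat q e (Nat.le_refl _) h0 h

-- ---- allocation-list structure ----

theorem pvAList_cons (tw : Int) (k : String) (w : Int) (q' : List (String × Int)) (r rem : Int) :
    pvAList tw ((k, w) :: q') r rem =
      (if 0 < min (pvNeed tw w) r + (if r < pvNeed tw w ∧ 0 < rem then (1 : Int) else 0)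
        then [(k, min (pvNeed tw w) r + (if r < pvNeed tw w ∧ 0 < rem then (1 : Int) else 0))] else [])
      ++ pvAList tw q' r (rem - (if r < pvNeed tw w ∧ 0 < rem then (1 : Int) else 0)) := rfl

theorem pvAList_zero (tw : Int) (q : List (String × Int)) : ∀ rem : Int,
    pvAList tw q 0 rem = ((q.take rem.toNat).map (·.1)).map (fun k => (k, (1 : Int))) := by
  induction q with
  | nil => intro rem; simp [pvAList]
  | cons p q' ih =>
    intro rem
    obtain ⟨k, w⟩ := p
    have hn := pvNeed_pos tw w
    rw [pvAList_cons]
    have hmin : min (pvNeed tw w) 0 = 0 := by omega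
    by_cases hrem : 0 < rem
    · have hex : (if 0 < pvNeed tw w ∧ 0 < rem then (1 : Int) else 0) = 1 :=
        if_pos ⟨by omega, hrem⟩
      rw [hex, hmin]
      norm_num
      rw [ih (rem - 1)]
      have h1 : rem.toNat = (rem - 1).toNat + 1 := by omega
      rw [h1, List.take_succ_cons]
      simp
    · have hex : (if 0 < pvNeed tw w ∧ 0 < rem then (1 : Int) else 0) = 0 :=
        if_neg (fun h => hrem h.2)
      rw [hex, hmin]
      norm_num
      rw [ih rem]
      have h1 : rem.toNat = 0 := by omega
      simp [h1]

theorem pvAList_fst (tw : Int) (q : List (String × Int)) (r : Int) (hr : 1 ≤ r) : ∀ rem : Int,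
    (pvAList tw q r rem).map (·.1) = q.map (·.1) := by
  induction q with
  | nil => intro rem; simp [pvAList]
  | cons p q' ih =>
    intro rem
    obtain ⟨k, w⟩ := p
    have hn := pvNeed_pos tw w
    rw [pvAList_cons]
    have hpos : 0 < min (pvNeed tw w) r + (if r < pvNeed tw w ∧ 0 < rem then (1 : Int) else 0) := by
      split <;> omega
    rw [if_pos hpos]
    simp only [List.map_append, List.map_cons, List.map_nil, List.singleton_append, List.cons.injEq,
      true_and]
    exact ih _

theorem pvAList_step_vsum (tw : Int) (q : List (String × Int)) (r : Int) (hr : 1 ≤ r) (v : String) :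
    ∀ rem : Int, pvVsum v (pvAList tw q r rem) =
      ((q.map (·.1)).count v : Int) + pvVsum v (pvAList tw (pvStep tw q) (r - 1) rem) := by
  induction q with
  | nil => intro rem; simp [pvAList, pvStep_nil, pvVsum_nil]
  | cons p q' ih =>
    intro rem
    obtain ⟨k, w⟩ := p
    have hn := pvNeed_pos tw w
    rw [pvAList_cons]
    by_cases hc : w + 1 < tw
    · -- survivor: need at least 2, re-queued with one less need
      have hn2 : 2 ≤ pvNeed tw w := (pvNeed_two_iff tw w).mp hc
      rw [pvStep_cons_keep tw (k, w) q' hc, pvAList_cons]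
      rw [pvNeed_succ tw w hc]
      have hex : (r - 1 < pvNeed tw w - 1 ∧ 0 < rem) ↔ (r < pvNeed tw w ∧ 0 < rem) := by
        constructor <;> (intro h; exact ⟨by omega, h.2⟩)
      by_cases hrem : r < pvNeed tw w ∧ 0 < rem
      · rw [if_pos hrem, if_pos (hex.mpr hrem)]
        have ha : 0 < min (pvNeed tw w) r + 1 := by omega
        rw [if_pos ha]
        have ha' : 0 < min (pvNeed tw w - 1) (r - 1) + 1 := by omega
        rw [if_pos ha']
        rw [List.singleton_append, List.singleton_append, pvVsum_cons, pvVsum_cons]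
        rw [ih (rem - 1)]
        have hmin : min (pvNeed tw w) r = min (pvNeed tw w - 1) (r - 1) + 1 := by omega
        rw [List.map_cons, List.count_cons]
        by_cases hkv : k = v <;> simp [hkv] <;> push_cast <;> omega
      · rw [if_neg hrem, if_neg (fun h => hrem (hex.mp h))]
        have ha : 0 < min (pvNeed tw w) r + 0 := by omega
        rw [if_pos ha]
        rw [List.singleton_append, pvVsum_cons]
        norm_num
        rw [ih rem]
        rw [List.count_cons, pvVsum_append]
        by_cases hb : 1 < pvNeed tw w ∧ 1 < r
        · rw [if_pos hb, pvVsum_cons, pvVsum_nil]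
          by_cases hkv : k = v <;> simp [hkv] <;> push_cast <;> omega
        · rw [if_neg hb]
          by_cases hkv : k = v <;> simp [hkv, pvVsum_nil] <;> push_cast <;> omega
    · -- leaver: need exactly 1, satisfied by a single unit
      have hn1 : pvNeed tw w = 1 := by simp [pvNeed]; omega
      rw [pvStep_cons_drop tw (k, w) q' hc]
      have hex : ¬ (r < pvNeed tw w ∧ 0 < rem) := by omega
      rw [if_neg hex]
      have ha : 0 < min (pvNeed tw w) r + 0 := by omega
      rw [if_pos ha]
      rw [List.singleton_append, pvVsum_cons]
      norm_num
      rw [ih rem]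
      rw [List.count_cons]
      by_cases hkv : k = v <;> simp [hkv] <;> push_cast <;> omega

theorem pvAFull_fst (tw : Int) (q : List (String × Int)) :
    (pvAFull tw q).map (·.1) = q.map (·.1) := by
  simp [pvAFull]

theorem pvAFull_step_vsum (tw : Int) (q : List (String × Int)) (v : String) :
    pvVsum v (pvAFull tw q) =
      ((q.map (·.1)).count v : Int) + pvVsum v (pvAFull tw (pvStep tw q)) := by
  induction q with
  | nil => simp [pvAFull, pvStep_nil, pvVsum_nil]
  | cons p q' ih =>
    obtain ⟨k, w⟩ := p
    have hn := pvNeed_pos tw w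
    by_cases hc : w + 1 < tw
    · rw [pvStep_cons_keep tw (k, w) q' hc]
      simp only [pvAFull, List.map_cons] at ih ⊢
      rw [pvVsum_cons, pvVsum_cons, pvNeed_succ tw w hc, List.count_cons, ih]
      by_cases hkv : k = v <;> simp [hkv] <;> push_cast <;> omega
    · have hn1 : pvNeed tw w = 1 := by simp [pvNeed]; omega
      rw [pvStep_cons_drop tw (k, w) q' hc]
      simp only [pvAFull, List.map_cons] at ih ⊢
      rw [pvVsum_cons, List.count_cons, ih, hn1]
      by_cases hkv : k = v <;> simp [hkv] <;> push_cast <;> omega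

-- ---- per-group closed forms ----

theorem pvFull_spec_aux (tw : Int) : ∀ (n : Nat) (q : List (String × Int)) (e : Int),
    e.toNat ≤ n → 0 ≤ e → pvT tw q ≤ e →
    ((pvTouch tw q e).length : Int) = pvT tw q ∧
    PySem.List.dedup (pvTouch tw q e) = PySem.List.dedup ((pvAFull tw q).map (·.1)) ∧
    ∀ v, ((pvTouch tw q e).count v : Int) = pvVsum v (pvAFull tw q) := by
  intro n
  induction n with
  | zero =>
    intro q e hn h0 hT
    have he : e = 0 := by omega
    subst he
    have hq : q = [] := by
      have h1 := pvLen_le_T tw q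
      have : q.length = 0 := by omega
      exact List.eq_nil_of_length_eq_zero this
    subst hq
    rw [pvTouch_nil]
    refine ⟨by simp [pvT, pvNds], rfl, fun v => by simp [pvAFull, pvVsum_nil]⟩
  | succ n ih =>
    intro q e hn h0 hT
    cases q with
    | nil =>
      rw [pvTouch_nil]
      refine ⟨by simp [pvT, pvNds], rfl, fun v => by simp [pvAFull, pvVsum_nil]⟩
    | cons p q' =>
      set q := p :: q' with hq
      have hlen1 : 1 ≤ (q.length : Int) := by simp [hq]
      have hlen : (q.length : Int) ≤ e := le_trans (pvLen_le_T tw q) hT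
      have hround := pvTouch_round tw q [] e hlen
      rw [List.append_nil, List.nil_append] at hround
      have hT' : pvT tw (pvStep tw q) ≤ e - q.length := by
        rw [pvT_step]; omega
      have h0' : (0 : Int) ≤ e - q.length := by omega
      have hn' : (e - (q.length : Int)).toNat ≤ n := by omega
      obtain ⟨iha, ihb, ihc⟩ := ih (pvStep tw q) (e - q.length) hn' h0' hT'
      refine ⟨?_, ?_, ?_⟩
      · rw [hround]
        simp only [List.length_append, List.length_map]
        push_cast
        rw [iha, pvT_step]
        omega
      · rw [hround, pvAFull_fst]
        apply pvDedup_append_subset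
        intro x hx
        exact pvStep_subset tw q x (pvTouch_subset tw _ _ x hx)
      · intro v
        rw [hround, List.count_append]
        push_cast
        rw [pvAFull_step_vsum tw q v, ihc v]

theorem pvFull_spec (e : Int) (tw : Int) (q : List (String × Int))
    (h0 : 0 ≤ e) (h : pvT tw q ≤ e) :
    ((pvTouch tw q e).length : Int) = pvT tw q ∧
    PySem.List.dedup (pvTouch tw q e) = PySem.List.dedup ((pvAFull tw q).map (·.1)) ∧
    ∀ v, ((pvTouch tw q e).count v : Int) = pvVsum v (pvAFull tw q) :=
  pvFull_spec_aux tw e.toNat q e (Nat.le_refl _) h0 h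

theorem pvCrux_aux (tw : Int) : ∀ (n : Nat) (q : List (String × Int)) (e r rem : Int),
    e.toNat ≤ n → 0 ≤ r → 0 ≤ rem → pvS tw q r + rem = e →
    rem < pvS tw q (r + 1) - pvS tw q r →
    ((pvTouch tw q e).length : Int) = e ∧
    PySem.List.dedup (pvTouch tw q e) = PySem.List.dedup ((pvAList tw q r rem).map (·.1)) ∧
    ∀ v, ((pvTouch tw q e).count v : Int) = pvVsum v (pvAList tw q r rem) := by
  intro n
  induction n with
  | zero =>
    intro q e r rem hn hr hrem he hlt
    have h0 : 0 ≤ e := by have := pvS_nonneg tw q r hr; omega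
    have he0 : e = 0 := by omega
    subst he0
    have hr0 : r = 0 := by
      by_contra hc
      have h1 : 1 ≤ r := by omega
      have h2 := pvS_mono tw q 1 r (by omega) h1
      rw [pvS_one] at h2
      have h3 := pvS_nonneg tw q r hr
      -- e = 0 = S r + rem, S r ≥ 0, rem ≥ 0 → S r = 0; but also rem < S (r+1) - S r
      have hq0 : (q.length : Int) ≤ 0 := by omega
      have hq : q = [] := List.eq_nil_of_length_eq_zero (by omega)
      subst hq
      simp [pvS, pvNds] at hlt
      omega
    subst hr0
    rw [pvS_zero] at he hlt
    norm_num at hlt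
    rw [pvS_one] at hlt
    have hrem0 : rem = 0 := by omega
    subst hrem0
    rw [pvTouch_nonpos tw q 0 (by omega), pvAList_zero]
    refine ⟨by simp, by simp, fun v => by simp [pvVsum_nil]⟩
  | succ n ih =>
    intro q e r rem hn hr hrem he hlt
    have hS0 := pvS_nonneg tw q r hr
    have h0 : 0 ≤ e := by omega
    by_cases hel : e < (q.length : Int)
    · -- partial round: the water level is zero and the budget goes to the first panels
      have hr0 : r = 0 := by
        by_contra hc
        have h1 := pvS_mono tw q 1 r (by omega) (by omega)
        rw [pvS_one] at h1
        omega
      subst hr0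
      rw [pvS_zero] at he hlt
      norm_num at hlt
      rw [pvS_one] at hlt
      have hrme : rem = e := by omega
      subst hrme
      rw [pvTouch_partial tw q rem h0 hel, pvAList_zero]
      refine ⟨?_, ?_, ?_⟩
      · simp only [List.length_map, List.length_take]
        have : rem.toNat ≤ q.length := by omega
        omega
      · congr 1
        rw [List.map_map]
        symm
        have hid : ((fun x : String × Int => x.1) ∘ (fun k : String => (k, (1 : Int)))) = id := rfl
        rw [hid, List.map_id]
      · intro v
        exact (pvVsum_ones v ((q.take rem.toNat).map (·.1))).symm
    · -- a complete round fits: peel it off and recurse at water level r - 1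
      have hq : q ≠ [] := by
        intro h
        subst h
        simp [pvS, pvNds] at hlt
        omega
      have hlen1 : 1 ≤ (q.length : Int) := by
        cases q with
        | nil => exact absurd rfl hq
        | cons a b => simp
      have hlen : (q.length : Int) ≤ e := by omega
      have hr1 : 1 ≤ r := by
        by_contra hc
        have hr0 : r = 0 := by omega
        subst hr0
        rw [pvS_zero] at he
        rw [pvS_zero] at hlt
        norm_num at hlt
        rw [pvS_one] at hlt
        omega
      have hround := pvTouch_round tw q [] e hlen
      rw [List.append_nil, List.nil_append] at hround
      have hsucc1 : pvS tw q r = (q.length : Int) + pvS tw (pvStep tw q) (r - 1) := by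
        have := pvS_succ_step tw q (r - 1) (by omega)
        rw [show r - 1 + 1 = r from by omega] at this
        exact this
      have hsucc2 : pvS tw q (r + 1) = (q.length : Int) + pvS tw (pvStep tw q) r := by
        exact pvS_succ_step tw q r (by omega)
      have hIH := ih (pvStep tw q) (e - q.length) (r - 1) rem (by omega) (by omega) hrem
        (by omega) (by rw [show r - 1 + 1 = r from by omega]; omega)
      obtain ⟨iha, ihb, ihc⟩ := hIH
      refine ⟨?_, ?_, ?_⟩
      · rw [hround]
        simp only [List.length_append, List.length_map]
        push_cast
        omega
      · rw [hround, pvAList_fst tw q r hr1]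
        apply pvDedup_append_subset
        intro x hx
        exact pvStep_subset tw q x (pvTouch_subset tw _ _ x hx)
      · intro v
        rw [hround, List.count_append]
        push_cast
        rw [pvAList_step_vsum tw q r hr1 v, ihc v]

theorem pvCrux (e : Int) (tw : Int) (q : List (String × Int)) (r rem : Int)
    (hr : 0 ≤ r) (hrem : 0 ≤ rem) (he : pvS tw q r + rem = e)
    (hlt : rem < pvS tw q (r + 1) - pvS tw q r) :
    ((pvTouch tw q e).length : Int) = e ∧
    PySem.List.dedup (pvTouch tw q e) = PySem.List.dedup ((pvAList tw q r rem).map (·.1)) ∧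
    ∀ v, ((pvTouch tw q e).count v : Int) = pvVsum v (pvAList tw q r rem) :=
  pvCrux_aux tw e.toNat q e r rem (Nat.le_refl _) hr hrem he hlt

-- ---- binary search specification ----

theorem pyAltRounds_spec_aux (needs : List Int) (e : Int) : ∀ (n : Nat) (lo hi : Int),
    (hi - lo).toNat ≤ n →
    ((needs.map (fun n => min n lo)).sum ≤ e) → (e < (needs.map (fun n => min n hi)).sum) → lo < hi →
    lo ≤ pyAltRounds needs e lo hi ∧
    (needs.map (fun n => min n (pyAltRounds needs e lo hi))).sum ≤ e ∧
    e < (needs.map (fun n => min n (pyAltRounds needs e lo hi + 1))).sum := by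
  intro n
  induction n with
  | zero => intro lo hi hn hlo hhi hlt; omega
  | succ n ih =>
    intro lo hi hn hlo hhi hlt
    rw [pyAltRounds.eq_def]
    by_cases h2 : 1 < hi - lo
    · rw [if_pos h2]
      have hm1 : lo + 1 ≤ PySem.Int.floordiv (lo + hi) 2 :=
        (PySem.Int.le_floordiv_iff_mul_le (by omega)).mpr (by omega)
      have hm2 : PySem.Int.floordiv (lo + hi) 2 < hi :=
        (PySem.Int.floordiv_lt_iff_lt_mul (by omega)).mpr (by omega)
      by_cases hc : (needs.map (fun n => min n (PySem.Int.floordiv (lo + hi) 2))).sum ≤ e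
      · rw [if_pos hc]
        have := ih (PySem.Int.floordiv (lo + hi) 2) hi (by omega) hc hhi (by omega)
        exact ⟨by omega, this.2.1, this.2.2⟩
      · rw [if_neg hc]
        exact ih lo (PySem.Int.floordiv (lo + hi) 2) (by omega) hlo (by omega) (by omega)
    · rw [if_neg h2]
      have hhi1 : hi = lo + 1 := by omega
      subst hhi1
      exact ⟨le_refl _, hlo, hhi⟩

theorem pyAltRounds_spec (needs : List Int) (e : Int) (lo hi : Int)
    (hlo : (needs.map (fun n => min n lo)).sum ≤ e)
    (hhi : e < (needs.map (fun n => min n hi)).sum) (hlt : lo < hi) :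
    lo ≤ pyAltRounds needs e lo hi ∧
    (needs.map (fun n => min n (pyAltRounds needs e lo hi))).sum ≤ e ∧
    e < (needs.map (fun n => min n (pyAltRounds needs e lo hi + 1))).sum :=
  pyAltRounds_spec_aux needs e (hi - lo).toNat lo hi (Nat.le_refl _) hlo hhi hlt

-- ---- erase / ofList dict helpers ----

theorem pvFind?_filter_ne {κ ν : Type} [BEq κ] [LawfulBEq κ] (items : List (κ × ν)) (k k' : κ)
    (h : k' ≠ k) :
    (items.filter (fun p => !(p.1 == k))).find? (fun p => p.1 == k') = items.find? (fun p => p.1 == k') := by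
  induction items with
  | nil => rfl
  | cons q t ih =>
    by_cases hqk : q.1 = k
    · have h1 : (q.1 == k) = true := by simpa using hqk
      have h2 : (q.1 == k') = false := by
        have : q.1 ≠ k' := hqk ▸ (Ne.symm h)
        simpa using this
      rw [List.filter_cons]
      simp only [h1, Bool.not_true, Bool.false_eq_true, if_false]
      rw [List.find?_cons]
      simp only [h2, cond_false]
      exact ih
    · have h1 : (q.1 == k) = false := by simpa using hqk
      rw [List.filter_cons]
      simp only [h1, Bool.not_false, if_true]
      rw [List.find?_cons, List.find?_cons]
      cases hq' : q.1 == k' with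
      | true => simp [hq']
      | false => simp [hq', ih]

theorem pvGetD_erase_of_ne {κ ν : Type} [BEq κ] [LawfulBEq κ] (d : PySem.Dict κ ν) (k k' : κ)
    (h : k' ≠ k) (v0 : ν) : ((d.erase k).getD k' v0) = d.getD k' v0 := by
  rw [PySem.Dict.getD_eq_get?_getD, PySem.Dict.getD_eq_get?_getD]
  have hq : (d.erase k).get? k' = d.get? k' := by
    show ((d.items.filter (fun p => !(p.1 == k))).find? (fun p => p.1 == k')).map (·.2)
        = (d.items.find? (fun p => p.1 == k')).map (·.2)
    rw [pvFind?_filter_ne d.items k k' h]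
  rw [hq]

theorem pvMem_items_update {κ ν : Type} [BEq κ] [LawfulBEq κ] : ∀ (l : List (κ × ν)) (d : PySem.Dict κ ν)
    (p : κ × ν), p ∈ (d.update l).items → p ∈ d.items ∨ p ∈ l := by
  intro l
  induction l with
  | nil => intro d p hp; exact Or.inl hp
  | cons x t ih =>
    intro d p hp
    have hstep : d.update (x :: t) = (d.insert x.1 x.2).update t := rfl
    rw [hstep] at hp
    rcases ih (d.insert x.1 x.2) p hp with h1 | h1
    · rcases (PySem.Dict.mem_items_insert d x.1 x.2 p).mp h1 with h2 | h2
      · exact Or.inr (List.mem_cons.mpr (Or.inl (by rw [h2])))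
      · exact Or.inl h2.1
    · right; right; exact h1

theorem pvOfList_values_nonempty (l : List (Int × List (String × Int)))
    (h : ∀ p ∈ l, p.2 ≠ []) (tw : Int) (htw : tw ∈ (PySem.Dict.ofList l).keys) :
    (PySem.Dict.ofList l).getD tw [] ≠ [] := by
  have hnd := PySem.Dict.nodup_keys_ofList l
  obtain ⟨p, hp, hfst⟩ := List.mem_map.mp htw
  have hget : (PySem.Dict.ofList l).getD p.1 [] = p.2 := by
    have hmem : (p.1, p.2) ∈ (PySem.Dict.ofList l).items := by simpa using hp
    exact PySem.Dict.getD_of_mem_items _ hmem hnd []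
  rw [← hfst, hget]
  rcases pvMem_items_update l PySem.Dict.empty p hp with h1 | h1
  · simp [PySem.Dict.empty] at h1
  · exact h p h1

-- ---- A-side decomposition ----

theorem pvFoldMod_nil (adds : PySem.Dict String Int) : pvFoldMod [] adds = adds := rfl
theorem pvFoldMod_cons (k : String) (a : Int) (t : List (String × Int)) (adds : PySem.Dict String Int) :
    pvFoldMod ((k, a) :: t) adds = pvFoldMod t (adds.modify k 0 (· + a)) := rfl
theorem pvFoldMod_append (l1 l2 : List (String × Int)) (adds : PySem.Dict String Int) :
    pvFoldMod (l1 ++ l2) adds = pvFoldMod l2 (pvFoldMod l1 adds) := List.foldl_append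

theorem pvLoopA_nonpos (d : PySem.Dict Int (List (String × Int))) (tws : List Int)
    (adds : PySem.Dict String Int) (e : Int) (he : e ≤ 0) : pyDistLoop d tws adds e = adds := by
  rw [pyDistLoop.eq_def, if_neg (by omega)]

theorem pvLoopA_nil (d : PySem.Dict Int (List (String × Int)))
    (adds : PySem.Dict String Int) (e : Int) : pyDistLoop d [] adds e = adds := by
  rw [pyDistLoop.eq_def]
  split <;> rfl

theorem pvLoopA_step (d : PySem.Dict Int (List (String × Int))) (tw : Int) (rest : List Int)
    (adds : PySem.Dict String Int) (e : Int) (k : String) (w : Int) (q' : List (String × Int))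
    (hp : 0 < e) (hq : d.getD tw [] = (k, w) :: q') :
    pyDistLoop d (tw :: rest) adds e =
      if w + 1 < tw then
        pyDistLoop ((d.insert tw q').insert tw (((d.insert tw q').getD tw []) ++ [(k, w + 1)]))
          (tw :: rest) (adds.modify k 0 (· + 1)) (e - 1)
      else if ((d.insert tw q').getD tw []).isEmpty then
        pyDistLoop ((d.insert tw q').erase tw) rest (adds.modify k 0 (· + 1)) (e - 1)
      else pyDistLoop (d.insert tw q') (tw :: rest) (adds.modify k 0 (· + 1)) (e - 1) := by
  rw [pyDistLoop.eq_def, if_pos hp]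
  simp only [hq, PySem.List.pop?_zero_cons]

theorem pvLoopA_group_aux (tw : Int) (rest : List Int) : ∀ (n : Nat) (e : Int)
    (d : PySem.Dict Int (List (String × Int))) (adds : PySem.Dict String Int),
    e.toNat ≤ n → d.getD tw [] ≠ [] →
    ∃ d', (∀ k0, k0 ≠ tw → d'.getD k0 [] = d.getD k0 []) ∧
      pyDistLoop d (tw :: rest) adds e =
        pyDistLoop d' rest
          (pvFoldMod ((pvTouch tw (d.getD tw []) e).map (fun k => (k, (1 : Int)))) adds)
          (e - (pvTouch tw (d.getD tw []) e).length) := by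
  intro n
  induction n with
  | zero =>
    intro e d adds hn hne
    have he : e ≤ 0 := by omega
    refine ⟨d, fun _ _ => rfl, ?_⟩
    rw [pvTouch_nonpos tw _ e he]
    simp only [List.map_nil, pvFoldMod_nil, List.length_nil]
    rw [pvLoopA_nonpos _ _ _ _ he, pvLoopA_nonpos _ _ _ _ (by push_cast; omega)]
  | succ n ih =>
    intro e d adds hn hne
    by_cases hp : 0 < e
    · cases hq : d.getD tw [] with
      | nil => exact absurd hq hne
      | cons p q' =>
        obtain ⟨k, w⟩ := p
        rw [pvLoopA_step d tw rest adds e k w q' hp hq]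
        rw [pvTouch_cons _ _ _ _ _ hp]
        by_cases hc : w + 1 < tw
        · rw [if_pos hc, if_pos hc]
          rw [PySem.Dict.getD_insert_self, PySem.Dict.insert_insert_self]
          have hne2 : (d.insert tw (q' ++ [(k, w + 1)])).getD tw [] ≠ [] := by
            rw [PySem.Dict.getD_insert_self]; simp
          obtain ⟨d', hd', heq⟩ := ih (e - 1) (d.insert tw (q' ++ [(k, w + 1)])) (adds.modify k 0 (· + 1))
            (by omega) hne2
          refine ⟨d', ?_, ?_⟩
          · intro k0 hk0
            rw [hd' k0 hk0, PySem.Dict.getD_insert_of_ne _ _ _ hk0]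
          · rw [heq, PySem.Dict.getD_insert_self]
            rw [List.map_cons, pvFoldMod_cons]
            simp only [List.length_cons]
            push_cast
            rw [show ∀ L : Int, e - (L + 1) = e - 1 - L from fun L => by omega]
        · rw [if_neg hc, if_neg hc]
          rw [PySem.Dict.getD_insert_self]
          cases q' with
          | nil =>
            simp only [List.isEmpty_nil, if_true]
            refine ⟨(d.insert tw []).erase tw, ?_, ?_⟩
            · intro k0 hk0
              rw [pvGetD_erase_of_ne _ tw k0 hk0, PySem.Dict.getD_insert_of_ne _ _ _ hk0]
            · rw [pvTouch_nil]
              rw [List.map_cons, List.map_nil, pvFoldMod_cons, pvFoldMod_nil]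
              norm_num
          | cons p2 q'' =>
            simp only [List.isEmpty_cons, if_false]
            have hne2 : (d.insert tw (p2 :: q'')).getD tw [] ≠ [] := by
              rw [PySem.Dict.getD_insert_self]; simp
            obtain ⟨d', hd', heq⟩ := ih (e - 1) (d.insert tw (p2 :: q'')) (adds.modify k 0 (· + 1))
              (by omega) hne2
            refine ⟨d', ?_, ?_⟩
            · intro k0 hk0
              rw [hd' k0 hk0, PySem.Dict.getD_insert_of_ne _ _ _ hk0]
            · rw [heq, PySem.Dict.getD_insert_self]
              rw [List.map_cons, pvFoldMod_cons]
              simp only [List.length_cons]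
              push_cast
              rw [show ∀ L : Int, e - (L + 1) = e - 1 - L from fun L => by omega]
    · have he : e ≤ 0 := by omega
      refine ⟨d, fun _ _ => rfl, ?_⟩
      rw [pvTouch_nonpos tw _ e he]
      simp only [List.map_nil, pvFoldMod_nil, List.length_nil]
      rw [pvLoopA_nonpos _ _ _ _ he, pvLoopA_nonpos _ _ _ _ (by push_cast; omega)]

theorem pvGTouch_nonpos (gs : List (Int × List (String × Int))) (e : Int) (he : e ≤ 0) :
    pvGTouch gs e = [] := by
  cases gs with
  | nil => rfl
  | cons g t => obtain ⟨tw, q⟩ := g; simp [pvGTouch, he]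

theorem pvLoopA_repr (tws : List Int) :
    ∀ (d : PySem.Dict Int (List (String × Int))) (adds : PySem.Dict String Int) (e : Int),
      tws.Nodup → (∀ tw ∈ tws, d.getD tw [] ≠ []) →
      pyDistLoop d tws adds e =
        pvFoldMod ((pvGTouch (tws.map (fun tw => (tw, d.getD tw []))) e).map (fun k => (k, (1 : Int)))) adds := by
  induction tws with
  | nil => intro d adds e _ _; rw [pvLoopA_nil]; rfl
  | cons tw rest ih =>
    intro d adds e hnd hne
    by_cases hp : 0 < e
    · simp only [List.map_cons, pvGTouch, if_neg (by omega : ¬ e ≤ 0)]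
      obtain ⟨d', hd', heq⟩ := pvLoopA_group_aux tw rest e.toNat e d adds (Nat.le_refl _)
        (hne tw (by simp))
      rw [heq]
      have hrest : ∀ tw' ∈ rest, d'.getD tw' [] ≠ [] := by
        intro tw' htw'
        have hne' : tw' ≠ tw := by
          intro h
          subst h
          exact (List.nodup_cons.mp hnd).1 htw'
        rw [hd' tw' hne']
        exact hne tw' (by simp [htw'])
      rw [ih d' _ _ (List.nodup_cons.mp hnd).2 hrest]
      have hmaps : rest.map (fun tw' => (tw', d'.getD tw' [])) = rest.map (fun tw' => (tw', d.getD tw' [])) := by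
        apply List.map_congr_left
        intro tw' htw'
        have hne' : tw' ≠ tw := by
          intro h
          subst h
          exact (List.nodup_cons.mp hnd).1 htw'
        rw [hd' tw' hne']
      rw [hmaps, List.map_append, pvFoldMod_append]
    · rw [pvLoopA_nonpos _ _ _ _ (by omega), pvGTouch_nonpos _ _ (by omega)]
      rfl

-- ---- B-side decomposition ----

theorem pvFullFold (tw : Int) : ∀ (panels : List (String × Int)) (adds : PySem.Dict String Int),
    (panels.zip (panels.map (fun p => max (tw - p.2) 1))).foldl
      (fun a pn => a.modify pn.1.1 0 (· + pn.2)) adds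
      = pvFoldMod (pvAFull tw panels) adds := by
  intro panels
  induction panels with
  | nil => intro adds; rfl
  | cons p ps ih =>
    intro adds
    obtain ⟨k, w⟩ := p
    rw [show ((k, w) :: ps).zip (((k, w) :: ps).map (fun p => max (tw - p.2) 1))
        = ((k, w), max (tw - w) 1) :: ps.zip (ps.map (fun p => max (tw - p.2) 1)) from rfl]
    rw [List.foldl_cons]
    rw [show pvAFull tw ((k, w) :: ps) = (k, pvNeed tw w) :: pvAFull tw ps from rfl, pvFoldMod_cons]
    exact ih _

theorem pvPartFold (tw r : Int) : ∀ (panels : List (String × Int)) (adds : PySem.Dict String Int)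
    (rem : Int),
    ((panels.zip (panels.map (fun p => max (tw - p.2) 1))).foldl
      (fun (st : PySem.Dict String Int × Int) pn =>
        (if 0 < min pn.2 r + (if r < pn.2 ∧ 0 < st.2 then (1 : Int) else 0) then
            st.1.modify pn.1.1 0 (· + (min pn.2 r + (if r < pn.2 ∧ 0 < st.2 then (1 : Int) else 0)))
          else st.1,
          st.2 - (if r < pn.2 ∧ 0 < st.2 then (1 : Int) else 0)))
      (adds, rem)).1
      = pvFoldMod (pvAList tw panels r rem) adds := by
  intro panels
  induction panels with
  | nil => intro adds rem; rfl
  | cons p ps ih =>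
    intro adds rem
    obtain ⟨k, w⟩ := p
    rw [show ((k, w) :: ps).zip (((k, w) :: ps).map (fun p => max (tw - p.2) 1))
        = ((k, w), max (tw - w) 1) :: ps.zip (ps.map (fun p => max (tw - p.2) 1)) from rfl]
    rw [List.foldl_cons]
    rw [pvAList_cons]
    have hneed : max (tw - w) 1 = pvNeed tw w := rfl
    simp only [hneed]
    by_cases hex : r < pvNeed tw w ∧ 0 < rem
    · rw [if_pos hex]
      by_cases ha : 0 < min (pvNeed tw w) r + 1
      · rw [if_pos ha, if_pos ha, List.singleton_append, pvFoldMod_cons]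
        exact ih _ _
      · rw [if_neg ha, if_neg ha, List.nil_append]
        exact ih _ _
    · rw [if_neg hex]
      by_cases ha : 0 < min (pvNeed tw w) r + 0
      · rw [if_pos ha, if_pos ha, List.singleton_append, pvFoldMod_cons]
        simpa using ih _ _
      · rw [if_neg ha, if_neg ha, List.nil_append]
        simpa using ih _ _

theorem pvBAll_cons (tw : Int) (q : List (String × Int)) (t : List (Int × List (String × Int))) (e : Int) :
    pvBAll ((tw, q) :: t) e = if e ≤ 0 then [] else
      if pvT tw q ≤ e then pvAFull tw q ++ pvBAll t (e - pvT tw q)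
      else match PySem.List.max? (pvNds tw q) (fun x => x) with
        | none => []
        | some mx => pvAList tw q (pyAltRounds (pvNds tw q) e 0 mx)
            (e - pvS tw q (pyAltRounds (pvNds tw q) e 0 mx)) := rfl

theorem pvAltMain_repr : ∀ (tws : List Int) (d0 : PySem.Dict Int (List (String × Int)))
    (adds : PySem.Dict String Int) (e : Int),
    pyAltMain tws d0 adds e = pvFoldMod (pvBAll (tws.map (fun tw => (tw, d0.getD tw []))) e) adds := by
  intro tws
  induction tws with
  | nil => intro d0 adds e; rfl
  | cons tw rest ih =>
    intro d0 adds e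
    rw [pyAltMain.eq_def]
    simp only [List.map_cons]
    by_cases he : e ≤ 0
    · rw [if_pos he, pvBAll_cons, if_pos he]
      rfl
    · rw [if_neg he]
      rw [pvBAll_cons, if_neg he]
      have hnds : (d0.getD tw []).map (fun p => max (tw - p.2) 1) = pvNds tw (d0.getD tw []) := rfl
      have htot : ((d0.getD tw []).map (fun p => max (tw - p.2) 1)).sum = pvT tw (d0.getD tw []) := rfl
      by_cases hfull : pvT tw (d0.getD tw []) ≤ e
      · rw [htot, if_pos hfull, if_pos hfull]
        rw [pvFullFold tw (d0.getD tw []) adds]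
        rw [ih d0 _ _]
        rw [pvFoldMod_append]
      · rw [htot, if_neg hfull, if_neg hfull]
        rw [hnds]
        cases hmx : PySem.List.max? (pvNds tw (d0.getD tw [])) (fun x => x) with
        | none => rfl
        | some mx =>
          exact pvPartFold tw (pyAltRounds (pvNds tw (d0.getD tw [])) e 0 mx) (d0.getD tw []) adds _

-- ---- the bridge ----

theorem pvGTouch_cons (tw : Int) (q : List (String × Int)) (t : List (Int × List (String × Int))) (e : Int) :
    pvGTouch ((tw, q) :: t) e = if e ≤ 0 then [] else
      pvTouch tw q e ++ pvGTouch t (e - (pvTouch tw q e).length) := rfl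

theorem pvBAll_nonpos (gs : List (Int × List (String × Int))) (e : Int) (he : e ≤ 0) :
    pvBAll gs e = [] := by
  cases gs with
  | nil => rfl
  | cons g t => obtain ⟨tw, q⟩ := g; rw [pvBAll_cons, if_pos he]

theorem pvNds_ge_one (tw : Int) (q : List (String × Int)) : ∀ n ∈ pvNds tw q, 1 ≤ n := by
  intro n hn
  simp only [pvNds, List.mem_map] at hn
  obtain ⟨p, _, hp⟩ := hn
  rw [← hp]
  exact pvNeed_pos tw p.2

theorem pvBridge : ∀ (gs : List (Int × List (String × Int))) (e : Int),
    PySem.List.dedup (pvGTouch gs e) = PySem.List.dedup ((pvBAll gs e).map (·.1)) ∧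
    ∀ v, ((pvGTouch gs e).count v : Int) = pvVsum v (pvBAll gs e) := by
  intro gs
  induction gs with
  | nil => intro e; exact ⟨rfl, fun v => by simp [pvGTouch, pvBAll, pvVsum_nil]⟩
  | cons g t ih =>
    intro e
    obtain ⟨tw, q⟩ := g
    rw [pvGTouch_cons, pvBAll_cons]
    by_cases he : e ≤ 0
    · rw [if_pos he, if_pos he]
      exact ⟨rfl, fun v => by simp [pvVsum_nil]⟩
    · rw [if_neg he, if_neg he]
      have h0 : (0 : Int) ≤ e := by omega
      by_cases hfull : pvT tw q ≤ e
      · rw [if_pos hfull]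
        obtain ⟨hfa, hfb, hfc⟩ := pvFull_spec e tw q h0 hfull
        rw [hfa]
        obtain ⟨ihd, ihc⟩ := ih (e - pvT tw q)
        constructor
        · rw [List.map_append]
          exact pvDedup_congr_append _ _ _ _ hfb ihd
        · intro v
          rw [List.count_append, pvVsum_append]
          push_cast
          rw [hfc v, ihc v]
      · rw [if_neg hfull]
        have hq : q ≠ [] := by
          intro hqq
          subst hqq
          simp [pvT, pvNds] at hfull
          omega
        cases hmx : PySem.List.max? (pvNds tw q) (fun x => x) with
        | none =>
          rw [PySem.List.max?_eq_none_iff] at hmx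
          simp only [pvNds, List.map_eq_nil_iff] at hmx
          exact absurd hmx hq
        | some mx =>
          have hmxmem : mx ∈ pvNds tw q := PySem.List.max?_mem hmx
          have hmx1 : 1 ≤ mx := pvNds_ge_one tw q mx hmxmem
          have hmax : ∀ n ∈ pvNds tw q, n ≤ mx := PySem.List.max?_isMax hmx
          have hlo : ((pvNds tw q).map (fun n => min n 0)).sum ≤ e := by
            rw [show ((pvNds tw q).map (fun n => min n 0)).sum = pvS tw q 0 from rfl, pvS_zero]
            omega
          have hhi : e < ((pvNds tw q).map (fun n => min n mx)).sum := by
            rw [show ((pvNds tw q).map (fun n => min n mx)).sum = pvS tw q mx from rfl]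
            rw [pvT_eq_S tw q mx hmax]
            omega
          obtain ⟨hR0, hRle, hRlt⟩ := pyAltRounds_spec (pvNds tw q) e 0 mx hlo hhi (by omega)
          set R := pyAltRounds (pvNds tw q) e 0 mx with hRdef
          have hSle : pvS tw q R ≤ e := hRle
          have hSlt : e < pvS tw q (R + 1) := hRlt
          obtain ⟨hca, hcb, hcc⟩ := pvCrux e tw q R (e - pvS tw q R) hR0 (by omega) (by omega) (by omega)
          rw [hca]
          rw [show e - e = (0 : Int) from by omega, pvGTouch_nonpos t 0 (le_refl 0), List.append_nil]
          exact ⟨hcb, hcc⟩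

-- ---- final assembly ----

theorem pvMain (l : List (Int × List (String × Int))) (e : Int)
    (hpre : e ≤ 0 ∨ ∀ p ∈ l, p.2 ≠ []) :
    distribute_width_to_cramped_panels_py l e = distribute_width_to_cramped_panels_py_alt l e := by
  unfold distribute_width_to_cramped_panels_py distribute_width_to_cramped_panels_py_alt
  simp only []
  set d := PySem.Dict.ofList l with hd
  set tws := PySem.List.sorted d.keys (fun x => x) false with htws
  rcases hpre with he | hne
  · rw [pvLoopA_nonpos _ _ _ _ he, pvAltMain_repr, pvBAll_nonpos _ _ he]
    rfl
  · have hnd : tws.Nodup := by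
      rw [htws]
      exact (List.Perm.nodup_iff (PySem.List.sorted_perm d.keys (fun x => x) false)).mpr
        (PySem.Dict.nodup_keys_ofList l)
    have hgne : ∀ tw ∈ tws, d.getD tw [] ≠ [] := by
      intro tw htw
      have : tw ∈ d.keys := by
        have := PySem.List.sorted_perm d.keys (fun x => x) false
        exact this.mem_iff.mp (htws ▸ htw)
      exact pvOfList_values_nonempty l hne tw this
    rw [pvLoopA_repr tws d PySem.Dict.empty e hnd hgne]
    rw [pvAltMain_repr tws d PySem.Dict.empty e]
    set G := tws.map (fun tw => (tw, d.getD tw [])) with hG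
    obtain ⟨hbd, hbc⟩ := pvBridge G e
    rw [pvFoldMod_empty_items, pvFoldMod_empty_items]
    have hfst : ((pvGTouch G e).map (fun k => (k, (1 : Int)))).map (·.1) = pvGTouch G e := by
      rw [List.map_map]
      exact List.map_id' _ -- (fst ∘ (k,1)) = id pointwise
    rw [hfst, hbd]
    apply List.map_congr_left
    intro k _
    have hones := pvVsum_ones k (pvGTouch G e)
    rw [hones, hbc k]

-- ===== VERDICT (by name: the statement is the Claim_ definition above) =====
theorem distribute_width_to_cramped_panels_py_spec : Claim_equal_distribute_width_to_cramped_panels_py := by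
  intro l e _ hpre
  unfold Spec_distribute_width_to_cramped_panels_py
  exact pvMain l e hpre
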